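-- pv_equiv track=rewrite | github.com/NIKKISAHA/leetcodePractise | LeetcodePractice/removedColoredPiecesOfSameNeibors.py | ri
-- ===== SOURCE A (Python) =====
-- def ri(s:str)->bool:
--     a,b=0,0
--     for i in range(1,len(s)-1):
--         if s[i-1]==s[i]==s[i+1]:
--             if s[i]=="A":
--                 a+=1
--             if s[i]=="B":
--                 b+=1
--     return a>b
-- ===== SOURCE B (Python) =====
-- def ri(s: str) -> bool:
--     # Run-length decomposition: a maximal run of length L contributes max(L-2,0) triples.
--     a = b = 0
--     i, n = 0, len(s)
--     while i < n:
--         j = i + 1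
--         while j < n and s[j] == s[i]:
--             j += 1
--         run = j - i
--         if run > 2:
--             if s[i] == "A":
--                 a += run - 2
--             elif s[i] == "B":
--                 b += run - 2
--         i = j
--     return a > b
-- ===== Notes on version B (the rewrite author's own statement) =====
-- stated objective: alternative
-- what changed: Replaces the per-index width-3 window test (three indexed lookups per position) with a single scan over maximal runs of equal characters, adding the closed-form contribution max(L-2,0) per run.
import Mathlib
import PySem

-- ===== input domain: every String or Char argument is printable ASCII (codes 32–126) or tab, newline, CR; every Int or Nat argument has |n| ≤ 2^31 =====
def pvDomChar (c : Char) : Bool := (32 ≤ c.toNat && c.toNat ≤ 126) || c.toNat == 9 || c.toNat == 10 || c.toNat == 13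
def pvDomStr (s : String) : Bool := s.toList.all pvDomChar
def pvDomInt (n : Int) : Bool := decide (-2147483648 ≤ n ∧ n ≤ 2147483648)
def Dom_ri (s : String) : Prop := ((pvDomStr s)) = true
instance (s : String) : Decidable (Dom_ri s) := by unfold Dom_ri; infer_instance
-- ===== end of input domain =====

-- B replaces A's per-index width-3 window test by one scan over maximal runs of equal
-- characters, each run of length L contributing max(L-2,0); alternative decomposition, same cost.


-- ===== PORT A =====
-- the body of A's for-loop (s[i-1]==s[i]==s[i+1]; indices are always in range, default unused)
def riStep (l : List Char) (ab : Int × Int) (i : Int) : Int × Int :=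
  if PySem.List.pyGetD l (i - 1) ' ' == PySem.List.pyGetD l i ' ' &&
     PySem.List.pyGetD l i ' ' == PySem.List.pyGetD l (i + 1) ' ' then
    let a := if PySem.List.pyGetD l i ' ' == 'A' then ab.1 + 1 else ab.1
    let b := if PySem.List.pyGetD l i ' ' == 'B' then ab.2 + 1 else ab.2
    (a, b)
  else ab

def ri (s : String) : Bool :=
  let l := s.toList
  let p := (PySem.List.pyRange 1 ((l.length : Int) - 1) 1).foldl (riStep l) ((0 : Int), (0 : Int))
  decide (p.1 > p.2)

-- ===== PORT B =====
-- Source B's inner 'while j < n and s[j] == s[i]' scan is the takeWhile/dropWhile split (exact)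
def riAltGo : List Char → Int → Int → Bool
  | [], a, b => decide (a > b)
  | c :: rest, a, b =>
    let t := rest.takeWhile (fun x => x == c)
    let run : Int := (t.length : Int) + 1
    let rest' := rest.dropWhile (fun x => x == c)
    if run > 2 then
      if c == 'A' then riAltGo rest' (a + (run - 2)) b
      else if c == 'B' then riAltGo rest' a (b + (run - 2))
      else riAltGo rest' a b
    else riAltGo rest' a b
termination_by l => l.length
decreasing_by all_goals exact Nat.lt_succ_of_le (List.length_dropWhile_le _ _)

def ri_alt (s : String) : Bool := riAltGo s.toList 0 0

-- ===== PRECONDITION & SPEC =====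
def Spec_ri (s : String) (out : Bool) : Prop := out = ri_alt s
instance (s : String) (out : Bool) : Decidable (Spec_ri s out) := by unfold Spec_ri; infer_instance

-- ===== CLAIM (what is proved, stated in full; the proofs are below) =====
def Claim_equal_ri : Prop := ∀ (s : String), Dom_ri s → Spec_ri s (ri s)

-- ===== LEMMAS AND PROOFS =====

-- canonical window counter: number of indices whose 3-window is three copies of c₀
def winC (c₀ : Char) : List Char → Int
  | x :: y :: z :: t => (if x = y ∧ y = z ∧ y = c₀ then (1 : Int) else 0) + winC c₀ (y :: z :: t)
  | _ => 0

theorem winC_cons_ne (c₀ c : Char) (r : List Char)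
    (hr : ∀ x, r.head? = some x → x ≠ c) :
    winC c₀ (c :: r) = winC c₀ r := by
  match r with
  | [] => rfl
  | [y] => rfl
  | y :: z :: t =>
    have hy : y ≠ c := hr y rfl
    show (if c = y ∧ y = z ∧ y = c₀ then (1 : Int) else 0) + winC c₀ (y :: z :: t) = _
    rw [if_neg (by rintro ⟨h1, -, -⟩; exact hy h1.symm)]
    simp

theorem winC_cons_cons_ne (c₀ c : Char) (r : List Char)
    (hr : ∀ x, r.head? = some x → x ≠ c) :
    winC c₀ (c :: c :: r) = winC c₀ (c :: r) := by
  match r with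
  | [] => rfl
  | y :: r2 =>
    have hy : y ≠ c := hr y rfl
    show (if c = c ∧ c = y ∧ c = c₀ then (1 : Int) else 0) + winC c₀ (c :: y :: r2) = _
    rw [if_neg (by rintro ⟨-, h2, -⟩; exact hy h2.symm)]
    simp

theorem winC_run (c₀ c : Char) (m : Nat) (r : List Char)
    (hr : ∀ x, r.head? = some x → x ≠ c) :
    winC c₀ (List.replicate m c ++ r)
      = (if c = c₀ then ((m - 2 : Nat) : Int) else 0) + winC c₀ r := by
  induction m with
  | zero => simp
  | succ k ih =>
    rw [show List.replicate (k + 1) c ++ r = c :: (List.replicate k c ++ r) by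
      simp [List.replicate_succ]]
    cases k with
    | zero =>
      simp only [List.replicate, List.nil_append]
      rw [winC_cons_ne c₀ c r hr]
      simp
    | succ j =>
      rw [show List.replicate (j + 1) c ++ r = c :: (List.replicate j c ++ r) by
        simp [List.replicate_succ]]
      cases j with
      | zero =>
        simp only [List.replicate, List.nil_append]
        rw [winC_cons_cons_ne c₀ c r hr, winC_cons_ne c₀ c r hr]
        simp
      | succ i =>
        rw [show List.replicate (i + 1) c ++ r = c :: (List.replicate i c ++ r) by
          simp [List.replicate_succ]]
        show (if c = c ∧ c = c ∧ c = c₀ then (1 : Int) else 0)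
            + winC c₀ (c :: c :: (List.replicate i c ++ r)) = _
        have hmid : c :: c :: (List.replicate i c ++ r)
            = List.replicate (i + 1 + 1) c ++ r := by
          simp [List.replicate_succ]
        rw [hmid, ih]
        split_ifs with h1 h2 h2 <;> simp_all <;> push_cast <;> omega

theorem go_spec : ∀ (n : Nat) (l : List Char), l.length ≤ n → ∀ (a b : Int),
    riAltGo l a b = decide (a + winC 'A' l > b + winC 'B' l) := by
  intro n
  induction n with
  | zero =>
    intro l hl a b
    have : l = [] := List.eq_nil_of_length_eq_zero (Nat.le_zero.mp hl)
    subst this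
    simp [riAltGo, winC]
  | succ n ih =>
    intro l hl a b
    match l with
    | [] => simp [riAltGo, winC]
    | c :: rest =>
      have hrep : rest.takeWhile (fun x => x == c)
          = List.replicate (rest.takeWhile (fun x => x == c)).length c := by
        apply List.eq_replicate_of_mem
        intro u hu
        have := List.mem_takeWhile_imp hu
        simpa using this
      have hhead : ∀ x, (rest.dropWhile (fun x => x == c)).head? = some x → x ≠ c := by
        intro x hx
        have := List.head?_dropWhile_not (p := fun x => x == c) (l := rest)
        rw [hx] at this
        simpa using this
      have hlist : c :: rest
          = List.replicate ((rest.takeWhile (fun x => x == c)).length + 1) c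
              ++ rest.dropWhile (fun x => x == c) := by
        conv_lhs => rw [← List.takeWhile_append_dropWhile (p := fun x => x == c) (l := rest)]
        rw [List.replicate_succ, List.cons_append, ← hrep]
      have hlen : (rest.dropWhile (fun x => x == c)).length ≤ n := by
        have h1 : (rest.dropWhile (fun x => x == c)).length ≤ rest.length :=
          List.length_dropWhile_le _ _
        have h2 : rest.length + 1 ≤ n + 1 := hl
        omega
      have hwA := winC_run 'A' c ((rest.takeWhile (fun x => x == c)).length + 1)
        (rest.dropWhile (fun x => x == c)) hhead
      have hwB := winC_run 'B' c ((rest.takeWhile (fun x => x == c)).length + 1)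
        (rest.dropWhile (fun x => x == c)) hhead
      rw [← hlist] at hwA hwB
      rw [riAltGo]
      by_cases hbig : ((rest.takeWhile (fun x => x == c)).length : Int) + 1 > 2
      · rw [if_pos hbig]
        by_cases hA : c = 'A'
        · subst hA
          rw [if_pos (by decide : ('A' == 'A') = true), ih _ hlen, hwA, hwB]
          simp only [if_true, if_neg (by decide : ¬('A' = 'B'))]
          have hc : (((rest.takeWhile (fun x => x == 'A')).length + 1 - 2 : Nat) : Int)
              = ((rest.takeWhile (fun x => x == 'A')).length : Int) + 1 - 2 := by omega
          rw [hc]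
          exact decide_eq_decide.mpr (by constructor <;> intro <;> omega)
        · rw [if_neg (by simpa using hA)]
          by_cases hB : c = 'B'
          · subst hB
            rw [if_pos (by decide : ('B' == 'B') = true), ih _ hlen, hwA, hwB]
            simp only [if_true, if_neg (by decide : ¬('B' = 'A'))]
            have hc : (((rest.takeWhile (fun x => x == 'B')).length + 1 - 2 : Nat) : Int)
                = ((rest.takeWhile (fun x => x == 'B')).length : Int) + 1 - 2 := by omega
            rw [hc]
            exact decide_eq_decide.mpr (by constructor <;> intro <;> omega)
          · rw [if_neg (by simpa using hB), ih _ hlen, hwA, hwB]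
            rw [if_neg hA, if_neg hB]
            exact decide_eq_decide.mpr (by constructor <;> intro <;> omega)
      · rw [if_neg hbig, ih _ hlen, hwA, hwB]
        have hz : (((rest.takeWhile (fun x => x == c)).length + 1 - 2 : Nat) : Int) = 0 := by
          omega
        rw [hz]
        exact decide_eq_decide.mpr (by split_ifs <;> constructor <;> intro <;> omega)

theorem pyGetD_shift (x : Char) (l' : List Char) (i : Int) (h : 1 ≤ i) :
    PySem.List.pyGetD (x :: l') i ' ' = PySem.List.pyGetD l' (i - 1) ' ' := by
  obtain ⟨m, rfl⟩ : ∃ m : Nat, i = (m : Int) + 1 := ⟨(i - 1).toNat, by omega⟩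
  have e1 : (m : Int) + 1 = ((m + 1 : Nat) : Int) := by push_cast; ring
  have e2 : (m : Int) + 1 - 1 = ((m : Nat) : Int) := by push_cast; ring
  rw [e2, e1, PySem.List.pyGetD_natCast, PySem.List.pyGetD_natCast]
  simp

theorem riStep_cons (x : Char) (l' : List Char) (ab : Int × Int) (i : Int) (h : 2 ≤ i) :
    riStep (x :: l') ab i = riStep l' ab (i - 1) := by
  simp only [riStep]
  rw [pyGetD_shift x l' (i - 1) (by omega), pyGetD_shift x l' i (by omega),
      pyGetD_shift x l' (i + 1) (by omega)]
  rw [show i + 1 - 1 = (i - 1) + 1 by ring]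

theorem foldl_shift (l' : List Char) (x : Char) :
    ∀ (r : List Nat) (init : Int × Int),
      List.foldl (fun (ab : Int × Int) (k : Nat) =>
          riStep (x :: l') ab (1 + ((k.succ : Nat) : Int))) init r
        = List.foldl (fun (ab : Int × Int) (k : Nat) =>
          riStep l' ab (1 + ((k : Nat) : Int))) init r := by
  intro r
  induction r with
  | nil => intro init; rfl
  | cons hd tl ihr =>
    intro init
    simp only [List.foldl_cons]
    have hstep : riStep (x :: l') init (1 + ((hd.succ : Nat) : Int))
        = riStep l' init (1 + ((hd : Nat) : Int)) := by
      rw [riStep_cons x l' init (1 + ((hd.succ : Nat) : Int)) (by push_cast; omega)]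
      congr 1
      push_cast
      ring
    rw [hstep]
    exact ihr _

theorem loop_spec : ∀ (l : List Char) (a b : Int),
    (PySem.List.pyRange 1 ((l.length : Int) - 1) 1).foldl (riStep l) (a, b)
      = (a + winC 'A' l, b + winC 'B' l) := by
  intro l
  induction l with
  | nil => intro a b; rw [PySem.List.pyRange_one_eq_nil (by norm_num)]; simp [winC]
  | cons x l' ih =>
    intro a b
    match l' with
    | [] =>
      rw [PySem.List.pyRange_one_eq_nil (by simp)]
      simp [winC]
    | [y] =>
      rw [PySem.List.pyRange_one_eq_nil (by simp)]
      simp [winC]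
    | y :: z :: t =>
      rw [PySem.List.pyRange_one]
      have htn : (((x :: y :: z :: t).length : Int) - 1 - 1).toNat = t.length + 1 := by
        simp; try omega
      rw [htn, List.foldl_map, List.range_succ_eq_map, List.foldl_cons, List.foldl_map]
      rw [show ((1 : Int) + ((0 : Nat) : Int)) = 1 by norm_num]
      rw [foldl_shift (y :: z :: t) x]
      have hstep1 : riStep (x :: y :: z :: t) (a, b) 1
          = (a + (if x = y ∧ y = z ∧ y = 'A' then (1 : Int) else 0),
             b + (if x = y ∧ y = z ∧ y = 'B' then (1 : Int) else 0)) := by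
        simp only [riStep]
        have g0 : PySem.List.pyGetD (x :: y :: z :: t) ((1 : Int) - 1) ' ' = x := by
          simp only [PySem.List.pyGetD, PySem.List.pyGet?, PySem.List.pyIdx?]
          norm_num
          rw [if_pos (by omega : (0 : Int) ≤ ↑t.length + 1 + 1)]
          simp
        have g1 : PySem.List.pyGetD (x :: y :: z :: t) (1 : Int) ' ' = y := by
          simp only [PySem.List.pyGetD, PySem.List.pyGet?, PySem.List.pyIdx?]
          norm_num
          rw [if_pos (by omega : (0 : Int) ≤ ↑t.length + 1)]
          simp
        have g2 : PySem.List.pyGetD (x :: y :: z :: t) ((1 : Int) + 1) ' ' = z := by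
          simp only [PySem.List.pyGetD, PySem.List.pyGet?, PySem.List.pyIdx?]
          norm_num
          rw [if_pos (by omega : (2 : Int) ≤ ↑t.length + 1 + 1)]
          simp
        rw [g0, g1, g2]
        by_cases hw : x = y ∧ y = z
        · rw [if_pos (by simp [hw.1, hw.2])]
          by_cases yA : y = 'A'
          · subst yA
            simp [hw.1, ← hw.2]
          · by_cases yB : y = 'B'
            · subst yB
              simp [hw.1, ← hw.2, yA]
            · simp [yA, yB]
        · rw [if_neg (by simpa using hw)]
          rw [if_neg (by tauto), if_neg (by tauto)]
          simp
      rw [hstep1]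
      have htail : (List.range t.length).foldl
            (fun (ab : Int × Int) (k : Nat) => riStep (y :: z :: t) ab (1 + ((k : Nat) : Int)))
            (a + (if x = y ∧ y = z ∧ y = 'A' then (1 : Int) else 0),
             b + (if x = y ∧ y = z ∧ y = 'B' then (1 : Int) else 0))
          = (PySem.List.pyRange 1 (((y :: z :: t).length : Int) - 1) 1).foldl
              (riStep (y :: z :: t))
              (a + (if x = y ∧ y = z ∧ y = 'A' then (1 : Int) else 0),
               b + (if x = y ∧ y = z ∧ y = 'B' then (1 : Int) else 0)) := by
        rw [PySem.List.pyRange_one]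
        have : ((((y :: z :: t).length : Int) - 1) - 1).toNat = t.length := by
          simp; try omega
        rw [this, List.foldl_map]
      rw [htail, ih]
      have hw : ∀ c₀, winC c₀ (x :: y :: z :: t)
          = (if x = y ∧ y = z ∧ y = c₀ then (1 : Int) else 0) + winC c₀ (y :: z :: t) := by
        intro c₀; rfl
      rw [hw 'A', hw 'B']
      simp only [Prod.mk.injEq]
      constructor <;> ring

-- ===== VERDICT (by name: the statement is the Claim_ definition above) =====
theorem ri_spec : Claim_equal_ri := by
  intro s _
  unfold Spec_ri ri ri_alt
  simp only
  rw [loop_spec s.toList 0 0, go_spec s.toList.length s.toList (le_refl _) 0 0]
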